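-- pv_equiv track=rewrite | github.com/jgoliszewski/SortingVisualiser | bucketSort.py | colorArray
-- ===== SOURCE A (Python) =====
-- orange = '#ffa500'
--
-- def colorArray(lenData, colorData):
-- 	colors = []
--
-- 	for i in range(lenData):
--
-- 		try:
-- 			colors.append(colorData[i])
--
-- 		except:
-- 			colors.append(orange)
--
-- 	return colors
-- ===== SOURCE B (Python) =====
-- orange = '#ffa500'
--
-- def colorArray(lenData, colorData):
--     n = max(0, lenData)
--     colors = list(colorData[:n])
--     colors += [orange] * (n - len(colors))
--     return colors
-- ===== Notes on version B (the rewrite author's own statement) =====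
-- stated objective: simpler
-- what changed: Replaces the per-index loop with a try/except-guarded append by two bulk operations: a truncating slice copy followed by appending the needed number of orange fillers.
import Mathlib
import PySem

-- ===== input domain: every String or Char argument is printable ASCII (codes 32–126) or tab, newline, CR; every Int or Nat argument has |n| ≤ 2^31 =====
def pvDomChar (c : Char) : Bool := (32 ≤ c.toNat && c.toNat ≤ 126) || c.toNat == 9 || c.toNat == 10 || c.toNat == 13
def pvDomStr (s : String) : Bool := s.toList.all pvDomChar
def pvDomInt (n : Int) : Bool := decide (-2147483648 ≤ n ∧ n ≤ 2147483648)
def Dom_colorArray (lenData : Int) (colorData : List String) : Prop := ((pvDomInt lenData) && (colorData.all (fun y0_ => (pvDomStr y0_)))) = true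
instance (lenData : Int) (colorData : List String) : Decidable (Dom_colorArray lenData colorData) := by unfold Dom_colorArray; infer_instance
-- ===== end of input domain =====

-- B replaces A's per-index try/except append loop by a truncating slice copy plus a bulk orange pad (simpler decomposition, same O(n) cost).

-- ===== PORT A =====
def pvOrange : String := "#ffa500"

def colorArray (lenData : Int) (colorData : List String) : List String :=
  (PySem.List.pyRange 0 lenData 1).foldl
    (fun colors i =>
      match PySem.List.pyGet? colorData i with   -- try: colorData[i] … except: orange
      | some c => colors ++ [c]
      | none   => colors ++ [pvOrange]) []

-- ===== PORT B =====
def colorArray_alt (lenData : Int) (colorData : List String) : List String :=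
  let n : Nat := (max 0 lenData).toNat
  let colors : List String := colorData.take n          -- list(colorData[:n]), n ≥ 0
  colors ++ List.replicate (n - colors.length) pvOrange -- colors += [orange] * (n - len(colors))

-- ===== PRECONDITION & SPEC =====
def Spec_colorArray (lenData : Int) (colorData : List String) (out : List String) : Prop := out = colorArray_alt lenData colorData
instance (lenData : Int) (colorData : List String) (out : List String) : Decidable (Spec_colorArray lenData colorData out) := by unfold Spec_colorArray; infer_instance

-- ===== CLAIM (what is proved, stated in full; the proofs are below) =====
def Claim_equal_colorArray : Prop := ∀ (lenData : Int) (colorData : List String), Dom_colorArray lenData colorData → Spec_colorArray lenData colorData (colorArray lenData colorData)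

-- ===== LEMMAS AND PROOFS =====

-- A's loop body is an append of the defaulted lookup.
theorem colorArray_eq_map (lenData : Int) (colorData : List String) :
    colorArray lenData colorData
      = (PySem.List.pyRange 0 lenData 1).map
          (fun i => (PySem.List.pyGet? colorData i).getD pvOrange) := by
  unfold colorArray
  have hf : (fun (colors : List String) i =>
      match PySem.List.pyGet? colorData i with
      | some c => colors ++ [c]
      | none   => colors ++ [pvOrange])
      = (fun (colors : List String) i => colors ++ [(PySem.List.pyGet? colorData i).getD pvOrange]) := by
    funext colors i
    cases PySem.List.pyGet? colorData i <;> simp [Option.getD]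
  rw [hf, PySem.List.foldl_append_singleton_eq_map]
  simp

-- The defaulted-lookup table over range n is exactly take-then-pad.
theorem map_getD_range (n : Nat) (cd : List String) :
    (List.range n).map (fun k => cd.getD k pvOrange)
      = cd.take n ++ List.replicate (n - (cd.take n).length) pvOrange := by
  induction cd generalizing n with
  | nil =>
      simp [List.map_const']
  | cons x cs ih =>
      cases n with
      | zero => simp
      | succ m =>
          rw [List.range_succ_eq_map]
          simp only [List.map_cons, List.map_map, Function.comp_def,
            List.getD_cons_zero, List.getD_cons_succ]
          rw [ih m]
          simp

-- ===== VERDICT (by name: the statement is the Claim_ definition above) =====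
theorem colorArray_spec : Claim_equal_colorArray := by
  intro lenData colorData _
  unfold Spec_colorArray colorArray_alt
  rw [colorArray_eq_map, PySem.List.pyRange_one]
  simp only [Int.sub_zero, List.map_map]
  have h1 : ((List.range lenData.toNat).map
      ((fun i => (PySem.List.pyGet? colorData i).getD pvOrange) ∘ fun k : Nat => (0 : Int) + k))
      = (List.range lenData.toNat).map (fun k => colorData.getD k pvOrange) := by
    apply List.map_congr_left
    intro k _
    simp [Function.comp, PySem.List.pyGet?_natCast, List.getD]
  rw [h1, map_getD_range]
  have h2 : (max 0 lenData).toNat = lenData.toNat := by omega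
  rw [h2]
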